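-- pv_equiv track=rewrite | github.com/chadhogg/AdventOfCode | 2023/python/2023Day10.py | countInside
-- ===== SOURCE A (Python) =====
-- def countInside(lines: list[str]) -> int:
--     sum = 0
--     for row in range(1, len(lines), 2):
--         for col in range(1, len(lines[row]), 2):
--             c = lines[row][col]
--             if c != '#' and c != 'O':
--                 sum += 1
--     return sum
-- ===== SOURCE B (Python) =====
-- def countInside(lines: list[str]) -> int:
--     total = 0
--     for row in lines[1::2]:
--         s = row[1::2]
--         total += len(s) - s.count('#') - s.count('O')
--     return total
-- ===== Notes on version B (the rewrite author's own statement) =====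
-- stated objective: alternative
-- what changed: Replaces the nested index loops with a per-cell branch by strided slices (lines[1::2], row[1::2]) and complementary counting: each odd row contributes len(s) - s.count('#') - s.count('O'), so the inner character loop and the branch disappear.
import Mathlib
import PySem

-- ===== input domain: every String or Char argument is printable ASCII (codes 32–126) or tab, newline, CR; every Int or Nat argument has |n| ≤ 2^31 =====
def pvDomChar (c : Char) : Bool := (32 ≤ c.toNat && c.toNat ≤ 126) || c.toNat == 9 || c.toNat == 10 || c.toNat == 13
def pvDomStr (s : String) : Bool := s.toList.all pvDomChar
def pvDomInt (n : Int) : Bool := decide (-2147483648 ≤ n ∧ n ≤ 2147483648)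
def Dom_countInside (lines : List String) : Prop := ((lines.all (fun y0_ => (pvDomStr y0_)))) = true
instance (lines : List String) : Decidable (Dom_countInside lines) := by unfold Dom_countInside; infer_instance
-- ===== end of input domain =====

-- B replaces A's nested index loops with a per-cell branch by strided slices (lines[1::2], row[1::2])
-- and complementary counting (len(s) - s.count('#') - s.count('O') per odd row); same return value.

-- ===== PORT A =====
def countInside (lines : List String) : Int :=
  (PySem.List.pyRange 1 (lines.length : Int) 2).foldl (fun sum row =>
    let line := PySem.List.pyGetD lines row ""
    (PySem.List.pyRange 1 (PySem.Str.len line) 2).foldl (fun sum col =>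
      let c := PySem.List.pyGetD line.toList col ' '
      if c ≠ '#' ∧ c ≠ 'O' then sum + 1 else sum) sum) 0

-- ===== PORT B =====
def countInside_alt (lines : List String) : Int :=
  ((PySem.List.slice? lines (some 1) none 2).getD []).foldl (fun total row =>
    let s := (PySem.Str.slice? row (some 1) none 2).getD ""
    total + PySem.Str.len s - (PySem.Str.count s "#" : Int) - (PySem.Str.count s "O" : Int)) 0

-- ===== PRECONDITION & SPEC =====
def Spec_countInside (lines : List String) (out : Int) : Prop := out = countInside_alt lines
instance (lines : List String) (out : Int) : Decidable (Spec_countInside lines out) := by unfold Spec_countInside; infer_instance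

-- ===== CLAIM (what is proved, stated in full; the proofs are below) =====
def Claim_equal_countInside : Prop := ∀ (lines : List String), Dom_countInside lines → Spec_countInside lines (countInside lines)

-- ===== LEMMAS AND PROOFS =====

-- the cells at odd positions of a list (what both [1::2] and range(1, n, 2) select)
def pvOdds {α : Type} : List α → List α
  | [] => []
  | [_] => []
  | _ :: y :: t => y :: pvOdds t

theorem pvOdds_eq_map {α : Type} (d : α) :
    ∀ xs : List α, pvOdds xs = (List.range (xs.length / 2)).map (fun k => xs.getD (2 * k + 1) d) := by
  intro xs
  induction xs using pvOdds.induct with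
  | case1 => simp [pvOdds]
  | case2 _ => simp [pvOdds]
  | case3 a b t ih =>
    simp only [pvOdds, List.length_cons]
    have h2 : (t.length + 1 + 1) / 2 = t.length / 2 + 1 := by omega
    rw [h2, List.range_succ_eq_map, List.map_cons, List.map_map]
    simp [ih, Function.comp_def, Nat.mul_add]

theorem pvFilterMap_odds {α : Type} :
    ∀ xs : List α, List.filterMap (fun k => xs[2*k+1]?) (List.range (xs.length/2)) = pvOdds xs := by
  intro xs
  induction xs using pvOdds.induct with
  | case1 => simp [pvOdds]
  | case2 _ => simp [pvOdds]
  | case3 a b t ih =>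
    simp only [pvOdds, List.length_cons]
    have hl : (t.length + 1 + 1) / 2 = t.length / 2 + 1 := by omega
    rw [hl, List.range_succ_eq_map, List.filterMap_cons, List.filterMap_map]
    have hsh : ∀ k, (a :: b :: t)[2*(k+1)+1]? = t[2*k+1]? := by
      intro k
      have : 2*(k+1)+1 = (2*k+1) + 1 + 1 := by omega
      simp [this]
    simp only [Function.comp_def, hsh]
    simp [ih]

theorem pvSlice_odds {α : Type} (xs : List α) :
    PySem.List.slice? xs (some 1) none 2 = some (pvOdds xs) := by
  rw [← pvFilterMap_odds]
  simp only [PySem.List.slice?, PySem.List.sliceIndices]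
  norm_num
  cases xs with
  | nil => simp
  | cons h t =>
    have h1 : min (1:Int) (((h::t).length:Int)) = 1 := by
      simp only [List.length_cons]; push_cast; omega
    simp only [h1]
    have hc : (if 1 < (h::t).length then ((((h::t).length:Int) - 1 + 2 - 1)/2).toNat else 0)
        = (h::t).length / 2 := by
      simp only [List.length_cons]; split_ifs with hif <;> push_cast at hif ⊢ <;> omega
    rw [hc]
    have hidx : ∀ k : Nat, ((1:Int) + 2*(k:Int)).toNat = 2*k+1 := by intro k; omega
    simp only [hidx]

theorem pvCount_go_singleton (c : Char) :
    ∀ (l : List Char) (acc : Nat), PySem.Chars.count.go [c] l.length l acc = acc + l.count c := by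
  intro l
  induction l with
  | nil => intro acc; simp [PySem.Chars.count.go]
  | cons h t ih =>
    intro acc
    rw [List.length_cons, PySem.Chars.count.go]
    by_cases hc : c = h
    · have hp : [c].isPrefixOf (h :: t) = true := by simp [List.isPrefixOf, hc]
      simp only [hp, if_pos, List.length_singleton, List.drop_succ_cons, List.drop_zero, ih]
      simp [hc]
      omega
    · have hp : [c].isPrefixOf (h :: t) = false := by
        simp only [List.isPrefixOf, Bool.and_true, beq_eq_false_iff_ne, ne_eq]
        exact fun hh => hc hh
      simp only [hp, Bool.false_eq_true, if_false, ih]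
      rw [List.count_cons_of_ne (Ne.symm hc)]

theorem pvCount_singleton (c : Char) (l : List Char) : PySem.Chars.count l [c] = l.count c := by
  simp [PySem.Chars.count, pvCount_go_singleton]

def pvKeep (c : Char) : Bool := !(c == '#') && !(c == 'O')

theorem pvKeep_eq (c : Char) : decide (c ≠ '#' ∧ c ≠ 'O') = pvKeep c := by
  simp [pvKeep, beq_eq_decide]

theorem pvComplement (l : List Char) :
    (l.length : Int) - (l.count '#' : Int) - (l.count 'O' : Int)
      = (l.countP pvKeep : Int) := by
  induction l with
  | nil => simp
  | cons h t ih =>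
    simp only [List.count_cons, List.countP_cons, List.length_cons]
    have hk : pvKeep h = (!(h == '#') && !(h == 'O')) := rfl
    by_cases h1 : h = '#' <;> by_cases h2 : h = 'O' <;>
      simp [hk, h1, h2] <;> push_cast at ih ⊢ <;> omega

theorem pvRangeCount (n : Nat) :
    (if (1:Int) < (n:Int) then (((n:Int) - 1 + 2 - 1)/2).toNat else 0) = n / 2 := by
  split_ifs with h <;> omega

theorem pvInner (cs : List Char) (acc : Int) :
    (PySem.List.pyRange 1 (cs.length : Int) 2).foldl (fun sum col =>
      let c := PySem.List.pyGetD cs col ' '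
      if c ≠ '#' ∧ c ≠ 'O' then sum + 1 else sum) acc
      = acc + ((pvOdds cs).countP pvKeep : Int) := by
  rw [PySem.List.pyRange_of_pos _ _ (by norm_num : (0:Int) < 2), pvRangeCount, List.foldl_map]
  have hidx : ∀ k : Nat, ((1:Int) + 2*(k:Int)) = ((2*k+1 : Nat) : Int) := by
    intro k; push_cast; ring
  simp only [hidx, PySem.List.pyGetD_natCast]
  rw [PySem.List.foldl_ite_add_one]
  simp only [pvKeep_eq]
  rw [pvOdds_eq_map ' ' cs, List.countP_map]
  rfl

theorem pvBodyB (total : Int) (r : String) :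
    total + PySem.Str.len ((PySem.Str.slice? r (some 1) none 2).getD "")
      - (PySem.Str.count ((PySem.Str.slice? r (some 1) none 2).getD "") "#" : Int)
      - (PySem.Str.count ((PySem.Str.slice? r (some 1) none 2).getD "") "O" : Int)
    = total + ((pvOdds r.toList).countP pvKeep : Int) := by
  have hmap := PySem.Str.slice?_map r (some 1) none 2
  rw [PySem.Chars.slice?_eq_listSlice?, pvSlice_odds] at hmap
  cases hs : PySem.Str.slice? r (some 1) none 2 with
  | none => rw [hs] at hmap; simp at hmap
  | some σ =>
    rw [hs] at hmap
    simp only [Option.map_some, Option.some.injEq] at hmap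
    simp only [Option.getD_some, PySem.Str.len_eq, PySem.Str.count_eq, hmap]
    have h1 : ("#" : String).toList = ['#'] := rfl
    have h2 : ("O" : String).toList = ['O'] := rfl
    rw [h1, h2, pvCount_singleton, pvCount_singleton]
    have := pvComplement (pvOdds r.toList)
    omega

-- ===== VERDICT (by name: the statement is the Claim_ definition above) =====
theorem countInside_spec : Claim_equal_countInside := by
  intro lines _
  unfold Spec_countInside countInside countInside_alt
  rw [pvSlice_odds lines, Option.getD_some]
  simp only [pvBodyB]
  rw [PySem.List.foldl_add]
  simp only [PySem.Str.len_eq, pvInner]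
  rw [PySem.List.pyRange_of_pos _ _ (by norm_num : (0:Int) < 2), pvRangeCount, List.foldl_map]
  have hidx : ∀ k : Nat, ((1:Int) + 2*(k:Int)) = ((2*k+1 : Nat) : Int) := by
    intro k; push_cast; ring
  simp only [hidx, PySem.List.pyGetD_natCast]
  rw [PySem.List.foldl_add]
  rw [pvOdds_eq_map "" lines, List.map_map]
  rfl
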